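-- pv_equiv track=rewrite | github.com/Adireign/BTP-DSD | backend/Main/Boolean_Algebra/booleanAlgebraFinal.py | minterm_to_table
-- ===== SOURCE A (Python) =====
-- def minterm_to_table(minterms, num_vars):
--     table=[]
--     for i in range(2**num_vars):
--         temp=format(i, f'0{num_vars}b')
--         list=[int(bit) for bit in temp]
--         if i in minterms:
--             list.append(1)
--         else:
--             list.append(0)
--         table.append(list)
--     return table
-- ===== SOURCE B (Python) =====
-- def minterm_to_table(minterms, num_vars):
--     size = 2 ** num_vars
--     table = []
--     for i in range(size):
--         bits = []
--         x = i
--         while x > 0: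
--             bits.append(x & 1)
--             x >>= 1
--         if not bits:
--             bits = [0]
--         while len(bits) < num_vars:
--             bits.append(0)
--         bits.reverse()
--         bits.append(0)
--         table.append(bits)
--     for m in minterms:
--         if 0 <= m < size:
--             table[m][-1] = 1
--     return table
-- ===== Notes on version B (the rewrite author's own statement) =====
-- stated objective: alternative
-- what changed: A tests 'i in minterms' for every row while formatting via format(); B builds the whole table with flag 0 in one pass (hand-rolled lsb bit loop) and then scatters 1s by direct indexing over minterms, so the per-row membership scan disappears; building the 2^n rows dominates, so it is not measurably faster.
import Mathlib
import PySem

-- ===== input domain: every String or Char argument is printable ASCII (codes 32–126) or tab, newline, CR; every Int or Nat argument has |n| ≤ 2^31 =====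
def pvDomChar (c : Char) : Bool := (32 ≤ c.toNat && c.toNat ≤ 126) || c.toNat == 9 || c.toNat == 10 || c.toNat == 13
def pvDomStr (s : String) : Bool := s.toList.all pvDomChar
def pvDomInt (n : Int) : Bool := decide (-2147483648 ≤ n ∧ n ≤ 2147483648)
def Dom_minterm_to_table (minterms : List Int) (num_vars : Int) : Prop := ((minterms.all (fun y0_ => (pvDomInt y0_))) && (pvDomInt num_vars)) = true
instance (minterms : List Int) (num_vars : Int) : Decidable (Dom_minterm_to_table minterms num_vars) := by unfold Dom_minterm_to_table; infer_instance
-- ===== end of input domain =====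

-- B builds the whole table with flag 0 first and then scatters 1s by direct indexing over
-- minterms (a different decomposition: no per-row membership scan; same overall cost).

-- ===== PORT A =====
-- binary digits of n, least-significant first (low-level helper used by both ports)
def lsbBits (n : Nat) : List Int :=
  if h : n = 0 then [] else (n % 2 : Int) :: lsbBits (n / 2)
decreasing_by exact Nat.div_lt_self (Nat.pos_of_ne_zero h) (by norm_num)

-- format(i, f'0{w}b') as a digit list: msb-first digits (minimum one digit),
-- left-padded with 0s to width w.  Exact for 0 ≤ i (the only values A formats).
def pyFormatBin (i : Int) (w : Int) : List Int :=
  let core := if i = 0 then [(0 : Int)] else (lsbBits i.toNat).reverse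
  List.replicate (w - (core.length : Int)).toNat 0 ++ core

def minterm_to_table (minterms : List Int) (num_vars : Int) : List (List Int) :=
  (PySem.List.pyRange 0 (2 ^ num_vars.toNat) 1).foldl
    (fun table i =>
      table ++ [pyFormatBin i num_vars ++ [if i ∈ minterms then (1 : Int) else 0]])
    []

-- ===== PORT B =====
-- Source B's per-row construction: lsb-first bit loop, lone 0 if empty, pad to num_vars,
-- reverse, append flag 0
def altRow (i : Int) (num_vars : Int) : List Int :=
  let bits1 := lsbBits i.toNat
  let bits2 := if bits1 = [] then [(0 : Int)] else bits1
  let bits3 := bits2 ++ List.replicate (num_vars.toNat - bits2.length) 0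
  bits3.reverse ++ [0]

def minterm_to_table_alt (minterms : List Int) (num_vars : Int) : List (List Int) :=
  let size : Int := 2 ^ num_vars.toNat
  let table := (PySem.List.pyRange 0 size 1).map (fun i => altRow i num_vars)
  minterms.foldl
    (fun table m =>
      if 0 ≤ m ∧ m < size then
        table.modify m.toNat (fun row => row.set (row.length - 1) 1)
      else table)
    table

-- ===== PRECONDITION & SPEC =====
-- A raises TypeError for num_vars < 0 (2**num_vars is a float there, so range() fails);
-- Pre_ excludes exactly those inputs (B raises there too).
def Pre_minterm_to_table (minterms : List Int) (num_vars : Int) : Prop := 0 ≤ num_vars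
instance (minterms : List Int) (num_vars : Int) : Decidable (Pre_minterm_to_table minterms num_vars) := by unfold Pre_minterm_to_table; infer_instance

def pvWitness_minterm_to_table : List Int × Int := ([1, 2], 2)

def Spec_minterm_to_table (minterms : List Int) (num_vars : Int) (out : List (List Int)) : Prop := out = minterm_to_table_alt minterms num_vars
instance (minterms : List Int) (num_vars : Int) (out : List (List Int)) : Decidable (Spec_minterm_to_table minterms num_vars out) := by unfold Spec_minterm_to_table; infer_instance

-- ===== CLAIM (what is proved, stated in full; the proofs are below) =====
def Claim_equal_minterm_to_table : Prop := ∀ (minterms : List Int) (num_vars : Int), Dom_minterm_to_table minterms num_vars → Pre_minterm_to_table minterms num_vars → Spec_minterm_to_table minterms num_vars (minterm_to_table minterms num_vars)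

-- ===== LEMMAS AND PROOFS =====

-- A's append-fold is the map of its row function
theorem foldl_append_map {α β : Type} (l : List α) (f : α → β) (acc : List β) :
    l.foldl (fun t i => t ++ [f i]) acc = acc ++ l.map f := by
  induction l generalizing acc with
  | nil => simp
  | cons a l ih => simp [List.foldl, ih]

-- reversing "pad on the right then reverse" is "pad on the left"
theorem pad_rev (b : List Int) (w : Int) :
    (b ++ List.replicate (w.toNat - b.length) 0).reverse ++ [(0 : Int)]
      = List.replicate ((w - (b.reverse.length : Int)).toNat) 0 ++ (b.reverse ++ [0]) := by
  have hc : w.toNat - b.length = (w - (b.length : Int)).toNat := by omega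
  rw [List.reverse_append, List.reverse_replicate, List.length_reverse, List.append_assoc, hc]

-- the two row functions agree (pre-scatter, flag 0) for 0 ≤ i
theorem altRow_eq (i w : Int) (hi : 0 ≤ i) :
    altRow i w = pyFormatBin i w ++ [0] := by
  simp only [altRow, pyFormatBin]
  have hcore : (if i = 0 then [(0 : Int)] else (lsbBits i.toNat).reverse)
      = (if lsbBits i.toNat = [] then [(0 : Int)] else lsbBits i.toNat).reverse := by
    by_cases h0 : i = 0
    · have hz : lsbBits (0 : Nat) = [] := by rw [lsbBits]; simp
      simp [h0, hz]
    · have hne : lsbBits i.toNat ≠ [] := by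
        intro h
        have ht : ¬ (i.toNat = 0) := by omega
        rw [lsbBits] at h
        simp [ht] at h
      simp [h0, hne]
  rw [hcore, List.append_assoc, ← pad_rev]

-- setting the last element of r ++ [a]
theorem set_last_append {α : Type} (r : List α) (a b : α) :
    (r ++ [a]).set ((r ++ [a]).length - 1) b = r ++ [b] := by
  rw [List.set_append]
  simp

-- modify at k on a map over range
theorem modify_map_range {α : Type} (n k : Nat) (f : Nat → α) (g : α → α) :
    ((List.range n).map f).modify k g
      = (List.range n).map (fun j => if j = k then g (f j) else f j) := by
  apply List.ext_getElem
  · simp [List.length_modify]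
  · intro j h1 h2
    rw [List.getElem_modify]
    simp only [List.getElem_map, List.getElem_range]
    by_cases h : k = j
    · simp [h]
    · have h' : ¬ j = k := fun hh => h hh.symm
      simp [h, h']

-- the scatter loop turns flags on exactly at the (in-range) members of ms
theorem scatter_loop (ms : List Int) (n : Nat) (r : Nat → List Int) (flag : Nat → Int) :
    ms.foldl
      (fun table m =>
        if 0 ≤ m ∧ m < (n : Int) then
          table.modify m.toNat (fun row => row.set (row.length - 1) 1)
        else table)
      ((List.range n).map (fun j => r j ++ [flag j]))
    = (List.range n).map (fun j => r j ++ [if (j : Int) ∈ ms then 1 else flag j]) := by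
  induction ms generalizing flag with
  | nil => simp
  | cons m rest ih =>
    rw [List.foldl_cons]
    by_cases hm : 0 ≤ m ∧ m < (n : Int)
    · rw [if_pos hm, modify_map_range]
      have hrow : (fun j => if j = m.toNat then
            (r j ++ [flag j]).set ((r j ++ [flag j]).length - 1) 1 else r j ++ [flag j])
          = (fun j => r j ++ [if (j : Int) = m then 1 else flag j]) := by
        funext j
        by_cases hj : j = m.toNat
        · subst hj
          rw [set_last_append]
          have hjm : ((m.toNat : Int)) = m := by omega
          simp [hjm]
        · have : ¬ ((j : Int) = m) := by omega
          simp [hj, this]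
      simp only [hrow]
      rw [ih (fun j => if (j : Int) = m then 1 else flag j)]
      apply List.map_congr_left
      intro j _
      by_cases h1 : (j : Int) ∈ rest
      · simp [h1]
      · by_cases h2 : (j : Int) = m <;> simp [h1, h2]
    · rw [if_neg hm, ih flag]
      apply List.map_congr_left
      intro j hj
      rw [List.mem_range] at hj
      have hne : ¬ ((j : Int) = m) := by omega
      by_cases h1 : (j : Int) ∈ rest <;> simp [h1, hne]

-- ===== VERDICT (by name: the statement is the Claim_ definition above) =====
theorem minterm_to_table_spec : Claim_equal_minterm_to_table := by
  intro minterms num_vars _ hpre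
  unfold Spec_minterm_to_table
  simp only [minterm_to_table, minterm_to_table_alt]
  have hcast : ((2 : Int) ^ num_vars.toNat) = (((2 ^ num_vars.toNat : Nat)) : Int) := by
    push_cast; ring
  rw [hcast]
  simp only [PySem.List.pyRange_one, Int.sub_zero, Int.toNat_natCast, zero_add]
  rw [foldl_append_map, List.map_map, List.map_map]
  have hB : (List.range (2 ^ num_vars.toNat)).map
        ((fun i => altRow i num_vars) ∘ fun k : Nat => (k : Int))
      = (List.range (2 ^ num_vars.toNat)).map
        (fun j : Nat => pyFormatBin (j : Int) num_vars ++ [(0 : Int)]) := by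
    apply List.map_congr_left
    intro j _
    exact altRow_eq (j : Int) num_vars (Int.natCast_nonneg j)
  rw [hB, scatter_loop]
  simp only [List.nil_append]
  apply List.map_congr_left
  intro j _
  rfl
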